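-- pv_equiv track=rewrite | github.com/mostgood1/WNBA-Betting | tools/audit_sim_engine_data_gaps_range.py | _candidate_cols
-- ===== SOURCE A (Python) =====
-- def _candidate_cols(all_cols: list[str], patterns: list[str]) -> list[str]:
--     cols = [c for c in all_cols]
--     out: list[str] = []
--     low = {c.lower(): c for c in cols}
--     for p in patterns:
--         if p.lower() in low:
--             out.append(low[p.lower()])
--     return out
-- ===== SOURCE B (Python) =====
-- def _candidate_cols(all_cols: list[str], patterns: list[str]) -> list[str]:
--     # Column-outer table algorithm: one slot per pattern (keyed by its lowercased
--     # form); each column overwrites the slots of every pattern it matches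
--     # case-insensitively, so the last matching column wins. Filled slots are
--     # emitted in pattern order.
--     res = [(p.lower(), None) for p in patterns]
--     for c in all_cols:
--         cl = c.lower()
--         res = [(pl, c if pl == cl else v) for (pl, v) in res]
--     return [v for (_, v) in res if v is not None]
-- ===== Notes on version B (the rewrite author's own statement) =====
-- stated objective: alternative
-- what changed: Inverts the loop nesting: instead of building a lowercase->column dict and looking each pattern up, B iterates columns on the outside over a per-pattern slot table which later matching columns overwrite, then emits the filled slots in pattern order.
import Mathlib
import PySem

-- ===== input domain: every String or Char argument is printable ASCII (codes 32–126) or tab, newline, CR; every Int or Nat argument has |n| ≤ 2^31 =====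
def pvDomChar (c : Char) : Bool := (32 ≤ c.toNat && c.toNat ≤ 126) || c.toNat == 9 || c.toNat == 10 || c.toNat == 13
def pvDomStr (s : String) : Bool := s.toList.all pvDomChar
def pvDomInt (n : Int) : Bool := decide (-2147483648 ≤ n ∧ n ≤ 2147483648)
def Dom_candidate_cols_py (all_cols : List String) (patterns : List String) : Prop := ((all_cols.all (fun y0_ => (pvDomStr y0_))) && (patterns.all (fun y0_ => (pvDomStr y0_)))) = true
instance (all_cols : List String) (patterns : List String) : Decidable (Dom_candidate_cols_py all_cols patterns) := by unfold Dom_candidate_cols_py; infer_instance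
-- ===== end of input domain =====

-- B replaces A's dict-then-lookup with an inverted-nesting algorithm: columns are the outer
-- loop over a per-pattern slot table that later matching columns overwrite (alternative, not faster).


-- ===== PORT A =====
def candidate_cols_py (all_cols : List String) (patterns : List String) : List String :=
  let cols := all_cols.foldl (fun acc c => acc ++ [c]) []      -- cols = [c for c in all_cols]
  let low : PySem.Dict String String :=
    cols.foldl (fun d c => d.insert (PySem.Str.lower c) c) PySem.Dict.empty
  patterns.foldl (fun out p =>
    if low.contains (PySem.Str.lower p) then
      out ++ [low.getD (PySem.Str.lower p) ""]                  -- low[p.lower()] (key present)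
    else out) []

-- ===== PORT B =====
-- res = [(p.lower(), None) for p in patterns]; for c in all_cols: res = [(pl, c if pl==cl else v) …];
-- return [v for (_, v) in res if v is not None]
def candidate_cols_py_alt (all_cols : List String) (patterns : List String) : List String :=
  let res0 : List (String × Option String) := patterns.map (fun p => (PySem.Str.lower p, none))
  let res := all_cols.foldl (fun res c =>
    let cl := PySem.Str.lower c
    res.map (fun pv => (pv.1, if pv.1 == cl then some c else pv.2))) res0
  res.filterMap (fun pv => pv.2)

-- ===== PRECONDITION & SPEC =====
def Spec_candidate_cols_py (all_cols : List String) (patterns : List String) (out : List String) : Prop := out = candidate_cols_py_alt all_cols patterns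
instance (all_cols : List String) (patterns : List String) (out : List String) : Decidable (Spec_candidate_cols_py all_cols patterns out) := by unfold Spec_candidate_cols_py; infer_instance

-- ===== CLAIM (what is proved, stated in full; the proofs are below) =====
def Claim_equal_candidate_cols_py : Prop := ∀ (all_cols : List String) (patterns : List String), Dom_candidate_cols_py all_cols patterns → Spec_candidate_cols_py all_cols patterns (candidate_cols_py all_cols patterns)

-- ===== LEMMAS AND PROOFS =====

-- [c for c in all_cols] is all_cols itself
theorem copy_foldl (xs : List String) : xs.foldl (fun acc c => acc ++ [c]) [] = xs := by
  simpa using (PySem.List.foldl_append_singleton_eq_map (f := id) (l := xs) (acc := []))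

-- the built dict's lookup equals a forward last-wins scan over the columns
theorem dict_scan (cols : List String) (d : PySem.Dict String String) (k : String) :
    (cols.foldl (fun d c => d.insert (PySem.Str.lower c) c) d).get? k
      = cols.foldl (fun m c => if PySem.Str.lower c == k then some c else m) (d.get? k) := by
  induction cols generalizing d with
  | nil => rfl
  | cons c cs ih =>
    simp only [List.foldl_cons, ih]
    congr 1
    rw [PySem.Dict.get?_insert]
    by_cases h : PySem.Str.lower c = k
    · simp [h]
    · simp [h, Ne.symm h]

-- A's per-pattern append loop is a filterMap of the per-pattern lookup
theorem foldl_if_append (xs : List String) (f : String → Option String) (acc : List String) :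
    xs.foldl (fun out p => if (f p).isSome then out ++ [(f p).getD ""] else out) acc
      = acc ++ xs.filterMap f := by
  induction xs generalizing acc with
  | nil => simp
  | cons x xs ih =>
    simp only [List.foldl_cons, List.filterMap_cons]
    cases h : f x <;> simp [ih]

-- B's column-outer table fold acts pointwise on each slot
theorem table_fold (cols : List String) (st : List (String × Option String)) :
    cols.foldl (fun res c =>
        res.map (fun pv => (pv.1, if pv.1 == PySem.Str.lower c then some c else pv.2))) st
      = st.map (fun pv => (pv.1,
          cols.foldl (fun v c => if pv.1 == PySem.Str.lower c then some c else v) pv.2)) := by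
  induction cols generalizing st with
  | nil => simp
  | cons c cs ih =>
    simp only [List.foldl_cons, ih, List.map_map]
    rfl

theorem candidate_cols_eq (all_cols patterns : List String) :
    candidate_cols_py all_cols patterns = candidate_cols_py_alt all_cols patterns := by
  unfold candidate_cols_py candidate_cols_py_alt
  dsimp only
  rw [copy_foldl, table_fold, List.filterMap_map]
  have hA : ∀ p : String,
      (List.foldl (fun d c => d.insert (PySem.Str.lower c) c) PySem.Dict.empty all_cols).get?
          (PySem.Str.lower p)
        = all_cols.foldl
            (fun v c => if PySem.Str.lower p == PySem.Str.lower c then some c else v) none := by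
    intro p
    have h := dict_scan all_cols PySem.Dict.empty (PySem.Str.lower p)
    simp only [PySem.Dict.get?_empty] at h
    rw [h]
    congr 1
    funext m c
    rw [Bool.beq_comm]
  have hfun :
      (fun (out : List String) (p : String) =>
          if (List.foldl (fun d c => d.insert (PySem.Str.lower c) c) PySem.Dict.empty all_cols).contains
              (PySem.Str.lower p) = true then
            out ++ [(List.foldl (fun d c => d.insert (PySem.Str.lower c) c) PySem.Dict.empty all_cols).getD
              (PySem.Str.lower p) ""]
          else out)
        = (fun out p =>
            if (all_cols.foldl
                (fun v c => if PySem.Str.lower p == PySem.Str.lower c then some c else v) none).isSome then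
              out ++ [(all_cols.foldl
                (fun v c => if PySem.Str.lower p == PySem.Str.lower c then some c else v) none).getD ""]
            else out) := by
    funext out p
    simp only [PySem.Dict.contains_eq_isSome_get?, PySem.Dict.getD_eq_get?_getD, hA]
  rw [hfun, foldl_if_append, List.nil_append]
  simp [List.filterMap_map, Function.comp]

-- ===== VERDICT (by name: the statement is the Claim_ definition above) =====
theorem candidate_cols_py_spec : Claim_equal_candidate_cols_py := by
  intro all_cols patterns _
  exact candidate_cols_eq all_cols patterns
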